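-- pv_equiv track=rewrite | github.com/takameyer/aoc-2024 | day9/p2.py | find_next_free_space_index_and_size
-- ===== SOURCE A (Python) =====
-- FREE_SPACE = '.'
--
-- def find_next_free_space_index_and_size(block_representation, start_index=0):
-- 	free_space_index = -1
-- 	free_space_size = 0
-- 	for i in range(start_index, len(block_representation)):
-- 		if block_representation[i] == FREE_SPACE:
-- 			if free_space_index == -1:
-- 				free_space_index = i
-- 			free_space_size += 1
-- 		elif free_space_index != -1:
-- 			break
--
-- 	return free_space_index, free_space_size
-- ===== SOURCE B (Python) =====
-- FREE_SPACE = '.'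
--
-- def find_next_free_space_index_and_size(block_representation, start_index=0):
-- 	n = len(block_representation)
-- 	# suffix run-length table: run[i] = length of the free run starting at i
-- 	run = [0] * (n + 1)
-- 	for i in range(n - 1, -1, -1):
-- 		if block_representation[i] == FREE_SPACE:
-- 			run[i] = run[i + 1] + 1
-- 	for i in range(start_index, n):
-- 		if run[i] > 0:
-- 			return i, run[i]
-- 	return -1, 0
-- ===== Notes on version B (the rewrite author's own statement) =====
-- stated objective: alternative
-- what changed: Replaces A's fused forward scan with first-hit flag and break by a back-to-front dynamic-programming pass that precomputes a suffix run-length table run[i] (length of the free run starting at i), followed by a lookup loop returning the first i >= start_index with run[i] > 0.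
-- outside the precondition, e.g. on find_next_free_space_index_and_size(['x', '.'], -2): A returns (1, 2), B returns (-2, 1)
import Mathlib
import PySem

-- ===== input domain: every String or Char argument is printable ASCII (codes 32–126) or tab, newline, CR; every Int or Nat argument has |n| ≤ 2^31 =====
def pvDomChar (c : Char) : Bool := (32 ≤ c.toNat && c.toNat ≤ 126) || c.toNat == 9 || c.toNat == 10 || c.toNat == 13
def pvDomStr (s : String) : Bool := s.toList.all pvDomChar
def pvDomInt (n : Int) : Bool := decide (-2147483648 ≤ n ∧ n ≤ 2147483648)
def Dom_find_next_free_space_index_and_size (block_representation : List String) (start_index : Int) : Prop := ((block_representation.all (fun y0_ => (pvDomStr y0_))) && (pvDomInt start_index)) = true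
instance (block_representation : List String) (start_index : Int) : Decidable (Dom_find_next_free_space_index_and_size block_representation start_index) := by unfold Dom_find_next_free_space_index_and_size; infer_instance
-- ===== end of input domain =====

-- B replaces A's fused forward scan (first-hit flag + break) by a back-to-front DP pass
-- building a suffix run-length table, then a lookup loop; objective: alternative algorithm.


-- ===== PORT A =====
-- the for-loop over range(start_index, len(b)) with state (free_space_index, free_space_size);
-- the `elif … break` returns the state; pyGet? none (IndexError, negative i) is outside Pre_
def pvALoop (b : List String) : List Int → Int × Int → Int × Int
  | [], st => st
  | i :: rest, (idx, size) =>
    match PySem.List.pyGet? b i with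
    | none => (idx, size)   -- Python raises IndexError here; excluded by Pre_
    | some v =>
      if v = "." then
        pvALoop b rest ((if idx = -1 then i else idx), size + 1)
      else if idx ≠ -1 then (idx, size)
      else pvALoop b rest (idx, size)

def find_next_free_space_index_and_size (block_representation : List String) (start_index : Int) : Int × Int :=
  pvALoop block_representation (PySem.List.pyRange start_index block_representation.length 1) (-1, 0)

-- ===== PORT B =====
-- run = [0]*(n+1); for i in range(n-1,-1,-1): if b[i]=='.': run[i] = run[i+1] + 1
-- (b[i] is always in range here, so pyGetD/pySetD are exact; run[i+1] with 0 ≤ i+1 ≤ n likewise)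
def pvRunTable (b : List String) : List Int :=
  (PySem.List.pyRange ((b.length : Int) - 1) (-1) (-1)).foldl
    (fun run i =>
      if PySem.List.pyGetD b i "" = "." then
        PySem.List.pySetD run i (PySem.List.pyGetD run (i + 1) 0 + 1)
      else run)
    (List.replicate (b.length + 1) 0)

-- for i in range(start_index, n): if run[i] > 0: return i, run[i]  — early return as recursion
def pvScan (run : List Int) : List Int → Int × Int
  | [] => (-1, 0)
  | i :: rest =>
    if PySem.List.pyGetD run i 0 > 0 then (i, PySem.List.pyGetD run i 0)
    else pvScan run rest

def find_next_free_space_index_and_size_alt (block_representation : List String) (start_index : Int) : Int × Int :=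
  pvScan (pvRunTable block_representation)
    (PySem.List.pyRange start_index block_representation.length 1)

-- ===== PRECONDITION & SPEC =====
-- Pre_ excludes negative start_index: for start_index < -len A raises IndexError, and for
-- -len ≤ start_index < 0 A's value (negative-index wraparound scanning the tail then restarting
-- at the front) and B's value (reading the run table at a wrapped-around position) are both
-- accidental readings of an argument the function is never meant to receive.
def Pre_find_next_free_space_index_and_size (block_representation : List String) (start_index : Int) : Prop :=
  0 ≤ start_index
instance (block_representation : List String) (start_index : Int) : Decidable (Pre_find_next_free_space_index_and_size block_representation start_index) := by unfold Pre_find_next_free_space_index_and_size; infer_instance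

def pvWitness_find_next_free_space_index_and_size : List String × Int := (["x", ".", ".", "y"], 0)

def Spec_find_next_free_space_index_and_size (block_representation : List String) (start_index : Int) (out : Int × Int) : Prop := out = find_next_free_space_index_and_size_alt block_representation start_index
instance (block_representation : List String) (start_index : Int) (out : Int × Int) : Decidable (Spec_find_next_free_space_index_and_size block_representation start_index out) := by unfold Spec_find_next_free_space_index_and_size; infer_instance

-- ===== CLAIM (what is proved, stated in full; the proofs are below) =====
def Claim_equal_find_next_free_space_index_and_size : Prop := ∀ (block_representation : List String) (start_index : Int), Dom_find_next_free_space_index_and_size block_representation start_index → Pre_find_next_free_space_index_and_size block_representation start_index → Spec_find_next_free_space_index_and_size block_representation start_index (find_next_free_space_index_and_size block_representation start_index)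

-- ===== LEMMAS AND PROOFS =====

-- length of the free run starting at position j (the value run[j] is meant to hold)
def pvRunLen (b : List String) (j : Nat) : Nat := ((b.drop j).takeWhile (· = ".")).length

theorem pvRunLen_of_dot (b : List String) (j : Nat) (hj : j < b.length) (hv : b[j] = ".") :
    pvRunLen b j = pvRunLen b (j + 1) + 1 := by
  unfold pvRunLen
  rw [List.drop_eq_getElem_cons hj]
  simp [hv]

theorem pvRunLen_of_not_dot (b : List String) (j : Nat) (hj : j < b.length) (hv : ¬ b[j] = ".") :
    pvRunLen b j = 0 := by
  unfold pvRunLen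
  rw [List.drop_eq_getElem_cons hj]
  simp [hv]

theorem pvRunLen_len (b : List String) : pvRunLen b b.length = 0 := by
  unfold pvRunLen; simp

-- the back-to-front DP loop: after processing indices m-1 … 0, every entry of the table
-- at positions ≤ b.length holds the run length, provided entries ≥ m already do and entries < m are 0
theorem pvRunTable_build (b : List String) :
    ∀ (m : Nat), m ≤ b.length → ∀ (r : List Int), r.length = b.length + 1 →
      (∀ j, m ≤ j → j ≤ b.length → r.getD j 0 = (pvRunLen b j : Int)) →
      (∀ j, j < m → r.getD j 0 = 0) →
      ∀ j, j ≤ b.length →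
        ((PySem.List.pyRange ((m : Int) - 1) (-1) (-1)).foldl
          (fun run i =>
            if PySem.List.pyGetD b i "" = "." then
              PySem.List.pySetD run i (PySem.List.pyGetD run (i + 1) 0 + 1)
            else run) r).getD j 0 = (pvRunLen b j : Int) := by
  intro m
  induction m with
  | zero =>
      intro _ r _ hhi _ j hj
      rw [PySem.List.pyRange_neg_one_eq_nil (by omega)]
      exact hhi j (by omega) hj
  | succ m ih =>
      intro hm r hlen hhi hlo j hj
      have hmb : m < b.length := by omega
      have hc : ((m + 1 : Nat) : Int) - 1 = (m : Int) := by push_cast; ring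
      rw [hc, PySem.List.pyRange_neg_one_cons (by omega), List.foldl_cons]
      have hget : PySem.List.pyGetD b (m : Int) "" = b[m] := by
        rw [PySem.List.pyGetD_natCast, List.getD_eq_getElem?_getD,
            List.getElem?_eq_getElem hmb, Option.getD_some]
      rw [hget]
      by_cases hv : b[m] = "."
      · rw [if_pos hv]
        have hget1 : PySem.List.pyGetD r ((m : Int) + 1) 0 = (pvRunLen b (m + 1) : Int) := by
          have : ((m : Int) + 1) = ((m + 1 : Nat) : Int) := by push_cast; ring
          rw [this, PySem.List.pyGetD_natCast]
          exact hhi (m + 1) (by omega) (by omega)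
        rw [hget1, PySem.List.pySetD_natCast]
        apply ih (by omega) _ (by simp [hlen])
        · intro j' hj1 hj2
          rcases Nat.eq_or_lt_of_le hj1 with h | h
          · subst h
            rw [List.getD_eq_getElem?_getD, List.getElem?_set_self (by omega),
                Option.getD_some, pvRunLen_of_dot b m (by omega) hv]
            push_cast; ring
          · rw [List.getD_eq_getElem?_getD, List.getElem?_set_ne (by omega), ← List.getD_eq_getElem?_getD]
            exact hhi j' (by omega) hj2
        · intro j' hj'
          rw [List.getD_eq_getElem?_getD, List.getElem?_set_ne (by omega), ← List.getD_eq_getElem?_getD]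
          exact hlo j' (by omega)
        · exact hj
      · rw [if_neg hv]
        apply ih (by omega) _ hlen
        · intro j' hj1 hj2
          rcases Nat.eq_or_lt_of_le hj1 with h | h
          · subst h
            rw [pvRunLen_of_not_dot b m (by omega) hv]
            exact hlo m (by omega)
          · exact hhi j' (by omega) hj2
        · intro j' hj'
          exact hlo j' (by omega)
        · exact hj

-- the run table holds exactly the run lengths
theorem pvRunTable_spec (b : List String) (j : Nat) (hj : j ≤ b.length) :
    (pvRunTable b).getD j 0 = (pvRunLen b j : Int) := by
  unfold pvRunTable
  exact pvRunTable_build b b.length (le_refl _) _ (by simp)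
    (fun j' h1 h2 => by
      have : j' = b.length := by omega
      subst this
      rw [List.getD_eq_getElem?_getD, List.getElem?_replicate_of_lt (by omega), Option.getD_some,
          pvRunLen_len]
      rfl)
    (fun j' h => by
      rw [List.getD_eq_getElem?_getD, List.getElem?_replicate_of_lt (by omega), Option.getD_some])
    j hj

-- A's counting phase: once idx ≠ -1, A just adds the length of the free run starting at k
theorem pvALoop_counting (b : List String) (idx size : Int) (hidx : idx ≠ -1) :
    ∀ k : Nat, pvALoop b (PySem.List.pyRange (k : Int) b.length 1) (idx, size)
      = (idx, size + (pvRunLen b k : Int)) := by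
  intro k
  induction hn : b.length - k generalizing k size with
  | zero =>
      have hk : b.length ≤ k := by omega
      rw [PySem.List.pyRange_one_eq_nil (by exact_mod_cast hk)]
      unfold pvRunLen
      simp [pvALoop, List.drop_eq_nil_of_le hk]
  | succ m ih =>
      have hk : k < b.length := by omega
      rw [PySem.List.pyRange_one_cons (by exact_mod_cast hk)]
      have hget : PySem.List.pyGet? b (k : Int) = some b[k] := by
        simp [PySem.List.pyGet?_natCast, List.getElem?_eq_getElem hk]
      simp only [pvALoop, hget]
      by_cases hv : b[k] = "."
      · have hcast : ((k : Int) + 1) = ((k + 1 : Nat) : Int) := by push_cast; ring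
        rw [if_pos hv, if_neg hidx, hcast, ih (size + 1) (k + 1) (by omega),
            pvRunLen_of_dot b k hk hv]
        push_cast; ring_nf
      · rw [if_neg hv, if_pos hidx, pvRunLen_of_not_dot b k hk hv]
        simp

-- both loops compute the same "locate-then-measure" value from any start position k
theorem pvALoop_searching (b : List String) :
    ∀ k : Nat, pvALoop b (PySem.List.pyRange (k : Int) b.length 1) (-1, 0)
      = (match (b.drop k).findIdx? (· = ".") with
         | none => ((-1 : Int), (0 : Int))
         | some j => (((k + j : Nat) : Int), (pvRunLen b (k + j) : Int))) := by
  intro k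
  induction hn : b.length - k generalizing k with
  | zero =>
      have hk : b.length ≤ k := by omega
      rw [PySem.List.pyRange_one_eq_nil (by exact_mod_cast hk)]
      simp [pvALoop, List.drop_eq_nil_of_le hk]
  | succ m ih =>
      have hk : k < b.length := by omega
      rw [PySem.List.pyRange_one_cons (by exact_mod_cast hk)]
      have hget : PySem.List.pyGet? b (k : Int) = some b[k] := by
        simp [PySem.List.pyGet?_natCast, List.getElem?_eq_getElem hk]
      have hdrop : b.drop k = b[k] :: b.drop (k + 1) := List.drop_eq_getElem_cons hk
      simp only [pvALoop, hget]
      by_cases hv : b[k] = "."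
      · rw [if_pos hv]
        simp only [if_true]
        have hcast : ((k : Int) + 1) = ((k + 1 : Nat) : Int) := by push_cast; ring
        norm_num
        rw [hcast, pvALoop_counting b (k : Int) 1 (by omega) (k + 1)]
        rw [hdrop]
        have hf0 : (b[k] :: b.drop (k + 1)).findIdx? (· = ".") = some 0 := by
          rw [List.findIdx?_cons]; simp [hv]
        rw [hf0]
        simp only [Nat.add_zero]
        rw [pvRunLen_of_dot b k hk hv]
        push_cast; ring_nf
      · rw [if_neg hv]
        simp only [ne_eq, not_true_eq_false]
        have hcast : ((k : Int) + 1) = ((k + 1 : Nat) : Int) := by push_cast; ring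
        rw [hcast, ih (k + 1) (by omega)]
        rw [hdrop]
        have hf : (b[k] :: b.drop (k + 1)).findIdx? (· = ".")
            = ((b.drop (k + 1)).findIdx? (· = ".")).map (· + 1) := by
          rw [List.findIdx?_cons]; simp [hv]
        rw [hf]
        cases hfi : (b.drop (k + 1)).findIdx? (· = ".") with
        | none => simp
        | some j =>
            simp only [Option.map_some]
            have h1 : k + 1 + j = k + (j + 1) := by omega
            rw [h1]
            simp

-- B's lookup loop computes the same "locate-then-measure" value
theorem pvScan_searching (b : List String) :
    ∀ k : Nat, pvScan (pvRunTable b) (PySem.List.pyRange (k : Int) b.length 1)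
      = (match (b.drop k).findIdx? (· = ".") with
         | none => ((-1 : Int), (0 : Int))
         | some j => (((k + j : Nat) : Int), (pvRunLen b (k + j) : Int))) := by
  intro k
  induction hn : b.length - k generalizing k with
  | zero =>
      have hk : b.length ≤ k := by omega
      rw [PySem.List.pyRange_one_eq_nil (by exact_mod_cast hk)]
      simp [pvScan, List.drop_eq_nil_of_le hk]
  | succ m ih =>
      have hk : k < b.length := by omega
      rw [PySem.List.pyRange_one_cons (by exact_mod_cast hk)]
      have hdrop : b.drop k = b[k] :: b.drop (k + 1) := List.drop_eq_getElem_cons hk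
      have hget : PySem.List.pyGetD (pvRunTable b) (k : Int) 0 = (pvRunLen b k : Int) := by
        rw [PySem.List.pyGetD_natCast, List.getD_eq_getElem?_getD]
        rw [← List.getD_eq_getElem?_getD]
        exact pvRunTable_spec b k (by omega)
      simp only [pvScan, hget]
      by_cases hv : b[k] = "."
      · have hpos : (0 : Int) < (pvRunLen b k : Int) := by
          rw [pvRunLen_of_dot b k hk hv]; push_cast; omega
        rw [if_pos hpos, hdrop]
        have hf0 : (b[k] :: b.drop (k + 1)).findIdx? (· = ".") = some 0 := by
          rw [List.findIdx?_cons]; simp [hv]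
        rw [hf0]
        simp
      · have hzero : (pvRunLen b k : Int) = 0 := by
          rw [pvRunLen_of_not_dot b k hk hv]; rfl
        rw [hzero]
        norm_num
        have hcast : ((k : Int) + 1) = ((k + 1 : Nat) : Int) := by push_cast; ring
        rw [hcast, ih (k + 1) (by omega), hdrop]
        have hf : (b[k] :: b.drop (k + 1)).findIdx? (· = ".")
            = ((b.drop (k + 1)).findIdx? (· = ".")).map (· + 1) := by
          rw [List.findIdx?_cons]; simp [hv]
        rw [hf]
        cases hfi : (b.drop (k + 1)).findIdx? (· = ".") with
        | none => simp
        | some j =>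
            simp only [Option.map_some]
            have h1 : k + 1 + j = k + (j + 1) := by omega
            rw [h1]
            simp

-- ===== VERDICT (by name: the statement is the Claim_ definition above) =====
theorem find_next_free_space_index_and_size_spec : Claim_equal_find_next_free_space_index_and_size := by
  intro b s _ hpre
  have hs0 : 0 ≤ s := hpre
  unfold Spec_find_next_free_space_index_and_size
  unfold find_next_free_space_index_and_size find_next_free_space_index_and_size_alt
  have hs : s = ((s.toNat : Nat) : Int) := by omega
  rw [hs, pvALoop_searching b s.toNat, pvScan_searching b s.toNat]
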